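-- pv_equiv track=rewrite | github.com/MakaLib/Python-study- | Lab6/maka.py | sumy
-- ===== SOURCE A (Python) =====
-- def sumy(n):
-- 	for i in range(1,n):
-- 		q = n
-- 		j = i
-- 		l = []
-- 		while (q != 0):
-- 			if q - j >= 0:
-- 				q = q - j
-- 				l.append(j)
-- 				#j = j - 1
-- 			else:
-- 				j = j -1
-- 		yield l
-- ===== SOURCE B (Python) =====
-- def sumy(n):
--     for i in range(1, n):
--         q = n // i
--         r = n % i
--         yield [i] * q + ([r] if r else [])
-- ===== Notes on version B (the rewrite author's own statement) =====
-- stated objective: faster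
-- what changed: Replaces the per-i subtract-and-decrement simulation (O(n) steps per yielded list) with the closed form [i]*(n//i) plus the remainder n%i, computed by one division per i.
import Mathlib
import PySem

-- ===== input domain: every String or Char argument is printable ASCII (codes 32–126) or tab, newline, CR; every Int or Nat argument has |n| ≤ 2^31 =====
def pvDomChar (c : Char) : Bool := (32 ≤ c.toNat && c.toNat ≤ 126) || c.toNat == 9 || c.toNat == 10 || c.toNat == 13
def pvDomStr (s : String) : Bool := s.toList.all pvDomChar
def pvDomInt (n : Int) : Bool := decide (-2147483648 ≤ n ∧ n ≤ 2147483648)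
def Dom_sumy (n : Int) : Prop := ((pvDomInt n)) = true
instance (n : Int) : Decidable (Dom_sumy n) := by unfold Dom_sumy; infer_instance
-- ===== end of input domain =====

-- B replaces A's per-i subtract/decrement simulation by one division per i: [i]*(n//i) ++ remainder (asymptotically faster).

-- ===== PORT A =====
-- the inner 'while q != 0' loop of A; the Nat fuel is only a totality guard
-- (the proof shows (n+i).toNat+1 fuel always suffices, so the guard branch is never taken on A's calls)
def sumyLoopA : Nat → Int → Int → List Int → List Int
  | 0, _, _, l => l
  | fuel+1, q, j, l =>
    if q ≠ 0 then
      if q - j ≥ 0 then sumyLoopA fuel (q - j) j (l ++ [j])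
      else sumyLoopA fuel q (j - 1) l
    else l

def sumy (n : Int) : List (List Int) :=
  (PySem.List.pyRange 1 n 1).map (fun i => sumyLoopA ((n + i).toNat + 1) n i [])

-- ===== PORT B =====
def sumy_alt (n : Int) : List (List Int) :=
  (PySem.List.pyRange 1 n 1).map (fun i =>
    List.replicate (PySem.Int.floordiv n i).toNat i ++
      (if PySem.Int.mod n i ≠ 0 then [PySem.Int.mod n i] else []))

-- ===== PRECONDITION & SPEC =====
def Spec_sumy (n : Int) (out : List (List Int)) : Prop := out = sumy_alt n
instance (n : Int) (out : List (List Int)) : Decidable (Spec_sumy n out) := by unfold Spec_sumy; infer_instance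

-- ===== CLAIM (what is proved, stated in full; the proofs are below) =====
def Claim_equal_sumy : Prop := ∀ (n : Int), Dom_sumy n → Spec_sumy n (sumy n)

-- ===== LEMMAS AND PROOFS =====

-- B's closed form for one i (definitionally the body of sumy_alt's map)
def pvClosed (q j : Int) : List Int :=
  List.replicate (PySem.Int.floordiv q j).toNat j ++
    (if PySem.Int.mod q j ≠ 0 then [PySem.Int.mod q j] else [])

theorem pvClosed_zero (j : Int) (hj : 0 < j) : pvClosed 0 j = [] := by
  simp [pvClosed, PySem.Int.floordiv_eq_ediv_of_pos hj, PySem.Int.mod_eq_emod_of_pos hj]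

theorem pvClosed_singleton (q m : Int) (h1 : 0 < q) (h2 : q ≤ m) : pvClosed q m = [q] := by
  have hm : 0 < m := lt_of_lt_of_le h1 h2
  rcases eq_or_lt_of_le h2 with h | h
  · subst h
    simp [pvClosed, PySem.Int.floordiv_eq_ediv_of_pos hm, PySem.Int.mod_eq_emod_of_pos hm,
      Int.ediv_self (by omega : q ≠ 0)]
  · have hdiv : q / m = 0 := Int.ediv_eq_zero_of_lt (le_of_lt h1) h
    have hmod : q % m = q := Int.emod_eq_of_lt (le_of_lt h1) h
    simp [pvClosed, PySem.Int.floordiv_eq_ediv_of_pos hm, PySem.Int.mod_eq_emod_of_pos hm,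
      hdiv, hmod, h1.ne']

theorem pvClosed_step (q j : Int) (hj : 0 < j) (hle : j ≤ q) :
    pvClosed q j = j :: pvClosed (q - j) j := by
  have hdiv : (q - j) / j = q / j - 1 := by
    have h := Int.add_mul_ediv_right q (-1) (by omega : j ≠ 0)
    have : q - j = q + (-1) * j := by ring
    rw [this, h]; ring
  have hmod : (q - j) % j = q % j := Int.sub_emod_right q j
  have hd1 : 1 ≤ q / j := by
    rw [Int.le_ediv_iff_mul_le hj]; omega
  have htn : (q / j).toNat = (q / j - 1).toNat + 1 := by omega
  simp only [pvClosed, PySem.Int.floordiv_eq_ediv_of_pos hj, PySem.Int.mod_eq_emod_of_pos hj,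
    hdiv, hmod, htn, List.replicate_succ, List.cons_append]

theorem sumyLoopA_eq (fuel : Nat) :
    ∀ (q j : Int) (l : List Int), 0 ≤ q → 1 ≤ j → (q + j).toNat + 1 ≤ fuel →
      sumyLoopA fuel q j l = l ++ pvClosed q j := by
  induction fuel with
  | zero => intro q j l _ _ hf; omega
  | succ f ih =>
    intro q j l hq hj hf
    by_cases hq0 : q = 0
    · subst hq0
      simp [sumyLoopA, pvClosed_zero j (by omega)]
    · have hqpos : 0 < q := lt_of_le_of_ne hq (Ne.symm hq0)
      by_cases hsub : q - j ≥ 0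
      · have : sumyLoopA (f + 1) q j l = sumyLoopA f (q - j) j (l ++ [j]) := by
          simp only [sumyLoopA]; rw [if_pos hq0, if_pos hsub]
        rw [this, ih (q - j) j (l ++ [j]) (by omega) hj (by omega)]
        rw [pvClosed_step q j (by omega) (by omega)]
        simp
      · have : sumyLoopA (f + 1) q j l = sumyLoopA f q (j - 1) l := by
          simp only [sumyLoopA]; rw [if_pos hq0, if_neg hsub]
        rw [this, ih q (j - 1) l hq (by omega) (by omega)]
        rw [pvClosed_singleton q j hqpos (by omega),
          pvClosed_singleton q (j - 1) hqpos (by omega)]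

-- ===== VERDICT (by name: the statement is the Claim_ definition above) =====
theorem sumy_spec : Claim_equal_sumy := by
  intro n _
  unfold Spec_sumy sumy sumy_alt
  apply List.map_congr_left
  intro i hi
  rw [PySem.List.mem_pyRange_one] at hi
  rw [sumyLoopA_eq ((n + i).toNat + 1) n i [] (by omega) (by omega) (le_refl _)]
  rfl
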